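-- pv_equiv track=rewrite | github.com/mohammadfaiizan/ProjectI | DSA/Problem/Trie/06_Bit_Manipulation_Optimization/1178_Number_of_Valid_Words_for_Each_Puzzle.py | find_num_words_bitmask
-- ===== SOURCE A (Python) =====
-- from typing import List, Dict, Set
-- from collections import defaultdict, Counter
--
-- def find_num_words_bitmask(words: List[str], puzzles: List[str]) -> List[int]:
--     """
--     Approach 2: Bit Manipulation with Masks
--
--     Convert words and puzzles to bitmasks for efficient operations.
--
--     Time: O(w + p * 2^7) where w=words, p=puzzles
--     Space: O(w) for word masks
--     """
--     def char_to_bit(c: str) -> int: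
--         """Convert character to bit position"""
--         return ord(c) - ord('a')
--
--     def string_to_mask(s: str) -> int:
--         """Convert string to bitmask"""
--         mask = 0
--         for c in s:
--             mask |= (1 << char_to_bit(c))
--         return mask
--
--     # Convert words to bitmasks and group by mask
--     word_masks = defaultdict(int)
--     for word in words:
--         mask = string_to_mask(word)
--         word_masks[mask] += 1
--
--     result = []
--
--     for puzzle in puzzles:
--         puzzle_mask = string_to_mask(puzzle)
--         first_bit = 1 << char_to_bit(puzzle[0])
--         count = 0
--
--         # Iterate through all subsets of puzzle
--         submask = puzzle_mask
--         while submask > 0: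
--             # Check if submask contains first letter
--             if submask & first_bit:
--                 count += word_masks[submask]
--
--             # Move to next submask
--             submask = (submask - 1) & puzzle_mask
--
--         result.append(count)
--
--     return result
-- ===== SOURCE B (Python) =====
-- def find_num_words_bitmask(words, puzzles):
--     """Direct per-word set-containment scan: no bitmask subset enumeration, no counter dict."""
--     word_sets = [set(w) for w in words]
--     result = []
--     for p in puzzles:
--         ps = set(p)
--         first = p[0]
--         result.append(sum(1 for s in word_sets if first in s and s <= ps))
--     return result
-- ===== Notes on version B (the rewrite author's own statement) =====
-- stated objective: simpler
-- what changed: Replaces A's bitmask machinery (per-mask counter dict plus the (submask-1)&mask subset enumeration over 2^k subsets of each puzzle) by a direct scan: precompute each word's letter set once, then for each puzzle count the word sets that contain the puzzle's first letter and are subsets of the puzzle's letter set.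
import Mathlib
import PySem

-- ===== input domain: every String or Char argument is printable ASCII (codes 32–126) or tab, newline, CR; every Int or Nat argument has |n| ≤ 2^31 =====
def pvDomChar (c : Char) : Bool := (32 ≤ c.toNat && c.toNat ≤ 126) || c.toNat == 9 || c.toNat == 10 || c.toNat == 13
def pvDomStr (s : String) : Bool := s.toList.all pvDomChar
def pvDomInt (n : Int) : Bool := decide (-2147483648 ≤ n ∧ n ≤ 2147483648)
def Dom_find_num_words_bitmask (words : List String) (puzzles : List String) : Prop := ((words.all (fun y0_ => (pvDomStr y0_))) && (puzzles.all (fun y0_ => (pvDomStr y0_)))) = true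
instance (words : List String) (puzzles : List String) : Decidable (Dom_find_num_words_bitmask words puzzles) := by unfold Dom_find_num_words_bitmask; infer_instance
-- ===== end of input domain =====

-- B replaces A's bitmask machinery (mask-counter dict + (submask-1)&mask subset enumeration) by a
-- direct per-word letter-set containment scan — simpler, not claimed faster.

-- ===== PORT A =====
-- Transliteration notes (all raising inputs are excluded by Pre_):
-- * ord(c) - ord('a'): Python raises ValueError ('1 << negative') when a char is below 'a'; on the
--   admitted inputs (all chars ≥ 'a') the Nat truncated subtraction below agrees exactly.
-- * puzzle[0] raises IndexError on an empty puzzle; Pre_ excludes it, headD's default is never read.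
-- * 'count += word_masks[submask]' reads the defaultdict(int); the lookup's side effect of inserting
--   a missing key with value 0 never changes any later lookup's value, so it is ported as getD _ 0.
def pvCharToBit (c : Char) : Nat := c.toNat - 97

def pvStringToMask (cs : List Char) : Nat :=
  cs.foldl (fun mask c => mask ||| (1 <<< pvCharToBit c)) 0

def pvSubmaskLoop (wm : PySem.Dict Nat Int) (pmask fb : Nat) (submask : Nat) (count : Int) : Int :=
  if 0 < submask then
    pvSubmaskLoop wm pmask fb ((submask - 1) &&& pmask)
      (if submask &&& fb ≠ 0 then count + wm.getD submask 0 else count)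
  else count
termination_by submask
decreasing_by exact Nat.lt_of_le_of_lt Nat.and_le_left (by omega)

def find_num_words_bitmask (words : List String) (puzzles : List String) : List Int :=
  let word_masks : PySem.Dict Nat Int :=
    words.foldl (fun d w => d.modify (pvStringToMask w.toList) 0 (· + 1)) PySem.Dict.empty
  puzzles.foldl (fun result p =>
    let pmask := pvStringToMask p.toList
    let fb := 1 <<< pvCharToBit (p.toList.headD 'a')
    result ++ [pvSubmaskLoop word_masks pmask fb pmask 0]) []

-- ===== PORT B =====
def find_num_words_bitmask_alt (words : List String) (puzzles : List String) : List Int :=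
  let word_sets : List (PySem.Set Char) := words.map (fun w => PySem.Set.ofList w.toList)
  puzzles.foldl (fun result p =>
    let ps : PySem.Set Char := PySem.Set.ofList p.toList
    let first := p.toList.headD 'a'
    result ++ [(word_sets.map (fun s =>
      if PySem.Set.contains s first && PySem.Set.issubset s ps then (1 : Int) else 0)).sum]) []

-- ===== PRECONDITION & SPEC =====
-- Pre_ = exactly the inputs where the Python A returns: every character of every word and puzzle is
-- ≥ 'a' (otherwise '1 << (ord(c) - ord('a'))' raises ValueError) and every puzzle is nonempty
-- (otherwise puzzle[0] raises IndexError).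
def Pre_find_num_words_bitmask (words : List String) (puzzles : List String) : Prop :=
  (words.all (fun w => w.toList.all (fun c => 97 ≤ c.toNat)) = true) ∧
  (puzzles.all (fun p => !p.toList.isEmpty && p.toList.all (fun c => 97 ≤ c.toNat)) = true)
instance (words : List String) (puzzles : List String) : Decidable (Pre_find_num_words_bitmask words puzzles) := by
  unfold Pre_find_num_words_bitmask; infer_instance

def pvWitness_find_num_words_bitmask : List String × List String := (["apple", "ax"], ["apex"])

def Spec_find_num_words_bitmask (words : List String) (puzzles : List String) (out : List Int) : Prop :=
  out = find_num_words_bitmask_alt words puzzles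
instance (words : List String) (puzzles : List String) (out : List Int) : Decidable (Spec_find_num_words_bitmask words puzzles out) := by
  unfold Spec_find_num_words_bitmask; infer_instance

-- ===== CLAIM (what is proved, stated in full; the proofs are below) =====
def Claim_equal_find_num_words_bitmask : Prop :=
  ∀ (words : List String) (puzzles : List String), Dom_find_num_words_bitmask words puzzles →
    Pre_find_num_words_bitmask words puzzles →
    Spec_find_num_words_bitmask words puzzles (find_num_words_bitmask words puzzles)

-- ===== LEMMAS AND PROOFS =====

-- character-to-bit is injective on chars ≥ 'a'
lemma pvBit_inj (c c' : Char) (h : 97 ≤ c.toNat) (h' : 97 ≤ c'.toNat)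
    (he : pvCharToBit c = pvCharToBit c') : c = c' := by
  apply Char.ext
  apply UInt32.toNat_inj.mp
  unfold pvCharToBit at he
  have : c.toNat = c'.toNat := by omega
  exact this

lemma pvMaskTestBit_aux (cs : List Char) : ∀ (a k : Nat),
    ((cs.foldl (fun m c => m ||| (1 <<< pvCharToBit c)) a).testBit k = true) ↔
      (a.testBit k = true ∨ ∃ c ∈ cs, pvCharToBit c = k) := by
  induction cs with
  | nil => intro a k; simp
  | cons x xs ih =>
    intro a k
    rw [List.foldl_cons, ih]
    rw [Nat.testBit_or]
    have hpow : (1 <<< pvCharToBit x).testBit k = decide (pvCharToBit x = k) := by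
      rw [Nat.one_shiftLeft, Nat.testBit_two_pow]
    rw [hpow]
    simp only [Bool.or_eq_true, decide_eq_true_eq, List.mem_cons]
    constructor
    · rintro (⟨h | h⟩ | ⟨c, hc, hck⟩)
      · exact Or.inl h
      · exact Or.inr ⟨x, Or.inl rfl, h⟩
      · exact Or.inr ⟨c, Or.inr hc, hck⟩
    · rintro (h | ⟨c, hcm, hck⟩)
      · exact Or.inl (Or.inl h)
      · rcases hcm with rfl | hc
        · exact Or.inl (Or.inr hck)
        · exact Or.inr ⟨c, hc, hck⟩

lemma pvMaskTestBit (cs : List Char) (k : Nat) :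
    ((pvStringToMask cs).testBit k = true) ↔ ∃ c ∈ cs, pvCharToBit c = k := by
  unfold pvStringToMask
  rw [pvMaskTestBit_aux]
  simp

lemma pvMaskSubset (w p : List Char) (hw : ∀ c ∈ w, 97 ≤ c.toNat) (hp : ∀ c ∈ p, 97 ≤ c.toNat) :
    (pvStringToMask w &&& pvStringToMask p = pvStringToMask w) ↔ ∀ c ∈ w, c ∈ p := by
  constructor
  · intro h c hc
    have hbit : (pvStringToMask w).testBit (pvCharToBit c) = true :=
      (pvMaskTestBit w _).mpr ⟨c, hc, rfl⟩
    have h2 : (pvStringToMask w &&& pvStringToMask p).testBit (pvCharToBit c) = true := by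
      rw [h]; exact hbit
    rw [Nat.testBit_and, hbit, Bool.true_and] at h2
    obtain ⟨c', hc', hck⟩ := (pvMaskTestBit p _).mp h2
    have := pvBit_inj c' c (hp c' hc') (hw c hc) hck
    rwa [this] at hc'
  · intro h
    apply Nat.eq_of_testBit_eq
    intro k
    rw [Nat.testBit_and]
    cases hb : (pvStringToMask w).testBit k with
    | false => simp
    | true =>
      obtain ⟨c, hc, hck⟩ := (pvMaskTestBit w _).mp hb
      have : (pvStringToMask p).testBit k = true := (pvMaskTestBit p _).mpr ⟨c, h c hc, hck⟩
      simp [this]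

lemma pvMaskFirst (w : List Char) (c0 : Char) (hw : ∀ c ∈ w, 97 ≤ c.toNat)
    (hc0 : 97 ≤ c0.toNat) :
    (pvStringToMask w &&& (1 <<< pvCharToBit c0) ≠ 0) ↔ c0 ∈ w := by
  rw [Nat.one_shiftLeft, Nat.and_two_pow]
  constructor
  · intro h
    have hb : (pvStringToMask w).testBit (pvCharToBit c0) = true := by
      cases hb : (pvStringToMask w).testBit (pvCharToBit c0) with
      | false => rw [hb] at h; simp at h
      | true => rfl
    obtain ⟨c, hc, hck⟩ := (pvMaskTestBit w _).mp hb
    have := pvBit_inj c c0 (hw c hc) hc0 hck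
    rwa [this] at hc
  · intro h
    have hb : (pvStringToMask w).testBit (pvCharToBit c0) = true :=
      (pvMaskTestBit w _).mpr ⟨c0, h, rfl⟩
    rw [hb]
    simp

-- bit 0 of an AND
lemma pvAndParity (a b : Nat) : (a &&& b) % 2 = 1 ↔ (a % 2 = 1 ∧ b % 2 = 1) := by
  have h2 := Nat.testBit_and a b 0
  rw [Nat.testBit_zero, Nat.testBit_zero, Nat.testBit_zero] at h2
  have h3 : (decide ((a &&& b) % 2 = 1) = true) ↔ (a % 2 = 1 ∧ b % 2 = 1) := by
    rw [h2]; simp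
  rw [decide_eq_true_eq] at h3
  exact h3

-- (s-1) &&& P is an upper bound for every submask of P strictly below s (s itself a submask of P):
-- the invariant behind Python's 'submask = (submask - 1) & puzzle_mask' enumeration
lemma pvSubmaskMax : ∀ s P m, s &&& P = s → m &&& P = m → m < s → m ≤ (s - 1) &&& P := by
  intro s
  induction s using Nat.strong_induction_on with
  | _ s IH =>
    intro P m hs hm hlt
    have hspos : 0 < s := by omega
    have hsd : s / 2 = s / 2 &&& P / 2 := by
      have := Nat.and_div_two (a := s) (b := P); rw [hs] at this; exact this
    have hmd : m / 2 = m / 2 &&& P / 2 := by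
      have := Nat.and_div_two (a := m) (b := P); rw [hm] at this; exact this
    have htd : ((s - 1) &&& P) / 2 = (s - 1) / 2 &&& P / 2 := Nat.and_div_two
    have hts := pvAndParity (s - 1) P
    have hsm : s % 2 = 1 → P % 2 = 1 := by
      intro h; exact ((pvAndParity s P).mp (by rw [hs]; exact h)).2
    have hmm : m % 2 = 1 → P % 2 = 1 := by
      intro h; exact ((pvAndParity m P).mp (by rw [hm]; exact h)).2
    rcases Nat.even_or_odd s with he | ho
    · -- s even and positive
      have hs2 : s % 2 = 0 := by rcases he with ⟨j, hj⟩; omega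
      have hs1d : (s - 1) / 2 = s / 2 - 1 := by omega
      have hIH := IH (s / 2) (by omega) (P / 2) (m / 2) hsd.symm hmd.symm (by omega)
      rw [hs1d] at htd
      have hm2 : m % 2 ≤ ((s - 1) &&& P) % 2 := by
        by_cases hmp : m % 2 = 1
        · have hp1 := hmm hmp
          have : ((s - 1) &&& P) % 2 = 1 := hts.mpr ⟨by omega, hp1⟩
          omega
        · omega
      omega
    · -- s odd
      have hs2 : s % 2 = 1 := by rcases ho with ⟨j, hj⟩; omega
      have ht0 : ((s - 1) &&& P) % 2 = 0 := by
        by_cases h : ((s - 1) &&& P) % 2 = 1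
        · have := (hts.mp h).1; omega
        · omega
      have hs1d : (s - 1) / 2 = s / 2 := by omega
      rw [hs1d, ← hsd] at htd
      omega

-- the submask loop sums the dict entries of all first-letter submasks of P up to the current state
lemma pvLoopEq (d : PySem.Dict Nat Int) (P fb : Nat) : ∀ s, s &&& P = s → ∀ acc,
    pvSubmaskLoop d P fb s acc =
      acc + ∑ m ∈ Finset.Icc 1 s, (if m &&& P = m ∧ m &&& fb ≠ 0 then d.getD m 0 else 0) := by
  intro s
  induction s using Nat.strong_induction_on with
  | _ s IH =>
    intro hs acc
    rw [pvSubmaskLoop]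
    by_cases hpos : 0 < s
    · rw [if_pos hpos]
      have htsub : (s - 1) &&& P &&& P = (s - 1) &&& P := by
        rw [Nat.and_assoc, Nat.and_self]
      have htlt : (s - 1) &&& P < s := Nat.lt_of_le_of_lt Nat.and_le_left (by omega)
      rw [IH _ htlt htsub]
      obtain ⟨s', rfl⟩ : ∃ s', s = s' + 1 := ⟨s - 1, by omega⟩
      rw [Finset.sum_Icc_succ_top (by omega)]
      have hcut : ∑ m ∈ Finset.Icc 1 s', (if m &&& P = m ∧ m &&& fb ≠ 0 then d.getD m 0 else 0) =
          ∑ m ∈ Finset.Icc 1 (s' + 1 - 1 &&& P), (if m &&& P = m ∧ m &&& fb ≠ 0 then d.getD m 0 else 0) := by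
        symm
        apply Finset.sum_subset
        · intro x hx
          rw [Finset.mem_Icc] at hx ⊢
          have : s' + 1 - 1 &&& P ≤ s' := Nat.le_trans Nat.and_le_left (by omega)
          omega
        · intro x hx hnx
          rw [Finset.mem_Icc] at hx
          rw [Finset.mem_Icc] at hnx
          by_cases hc : x &&& P = x ∧ x &&& fb ≠ 0
          · exfalso
            have := pvSubmaskMax (s' + 1) P x hs hc.1 (by omega)
            omega
          · rw [if_neg hc]
      rw [hcut]
      have hlast : (if (s' + 1) &&& P = s' + 1 ∧ (s' + 1) &&& fb ≠ 0 then d.getD (s' + 1) 0 else 0) =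
          (if (s' + 1) &&& fb ≠ 0 then d.getD (s' + 1) 0 else 0) := by
        by_cases hfb : (s' + 1) &&& fb ≠ 0
        · rw [if_pos ⟨hs, hfb⟩, if_pos hfb]
        · rw [if_neg (fun h => hfb h.2), if_neg hfb]
      rw [hlast]
      by_cases hfb : (s' + 1) &&& fb ≠ 0
      · rw [if_pos hfb, if_pos hfb]; ring
      · rw [if_neg hfb, if_neg hfb]; ring
    · rw [if_neg hpos]
      have : s = 0 := by omega
      subst this
      simp

-- turning the sum over submasks of the per-mask counts into a per-element 0/1 sum
lemma pvSumCount (P fb : Nat) (L : List Nat)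
    (hmem : ∀ x, x &&& P = x → x &&& fb ≠ 0 → x ∈ Finset.Icc 1 P) :
    (∑ m ∈ Finset.Icc 1 P, if m &&& P = m ∧ m &&& fb ≠ 0 then (L.count m : Int) else 0)
      = (L.map (fun x => if x &&& P = x ∧ x &&& fb ≠ 0 then (1 : Int) else 0)).sum := by
  induction L with
  | nil => simp
  | cons x L ih =>
    simp only [List.map_cons, List.sum_cons]
    have hsplit : ∀ m ∈ Finset.Icc 1 P,
        (if m &&& P = m ∧ m &&& fb ≠ 0 then ((x :: L).count m : Int) else 0) =
          (if m &&& P = m ∧ m &&& fb ≠ 0 then (L.count m : Int) else 0) +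
          (if m = x then (if m &&& P = m ∧ m &&& fb ≠ 0 then (1 : Int) else 0) else 0) := by
      intro m _
      rw [List.count_cons]
      by_cases hc : m &&& P = m ∧ m &&& fb ≠ 0
      · rw [if_pos hc, if_pos hc]
        by_cases hmx : m = x
        · rw [if_pos hmx, if_pos hc, if_pos (by simp [hmx])]
          push_cast
          ring
        · rw [if_neg hmx, if_neg (by simp [Ne.symm hmx])]
          push_cast
          ring
      · rw [if_neg hc, if_neg hc]
        by_cases hmx : m = x
        · rw [if_pos hmx, if_neg hc]; ring
        · rw [if_neg hmx]; ring
    rw [Finset.sum_congr rfl hsplit, Finset.sum_add_distrib, ih,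
      Finset.sum_ite_eq' (Finset.Icc 1 P) x (fun m => if m &&& P = m ∧ m &&& fb ≠ 0 then (1 : Int) else 0)]
    by_cases hcx : x &&& P = x ∧ x &&& fb ≠ 0
    · simp only [if_pos hcx]
      rw [if_pos (hmem x hcx.1 hcx.2)]
      ring
    · simp only [if_neg hcx]
      simp

lemma pvHeadDMem (p : List Char) (hne : p ≠ []) : p.headD 'a' ∈ p := by
  cases p with
  | nil => exact absurd rfl hne
  | cons a l => simp [List.headD]

-- the per-puzzle value of A's loop equals B's per-puzzle set scan
lemma pvPerPuzzle (words : List String) (p : List Char)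
    (hw : ∀ w ∈ words, ∀ c ∈ w.toList, 97 ≤ c.toNat)
    (hne : p ≠ []) (hpc : ∀ c ∈ p, 97 ≤ c.toNat) :
    pvSubmaskLoop
        (words.foldl (fun d w => d.modify (pvStringToMask w.toList) 0 (· + 1)) PySem.Dict.empty)
        (pvStringToMask p) (1 <<< pvCharToBit (p.headD 'a')) (pvStringToMask p) 0
      = ((words.map (fun w => PySem.Set.ofList w.toList)).map
          (fun s => if PySem.Set.contains s (p.headD 'a') &&
              PySem.Set.issubset s (PySem.Set.ofList p) then (1 : Int) else 0)).sum := by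
  have hc0mem : p.headD 'a' ∈ p := pvHeadDMem p hne
  have hc097 : 97 ≤ (p.headD 'a').toNat := hpc _ hc0mem
  rw [pvLoopEq _ _ _ (pvStringToMask p) (Nat.and_self _) 0, zero_add]
  have hd : ∀ m, (words.foldl (fun d w => d.modify (pvStringToMask w.toList) 0 (· + 1))
      PySem.Dict.empty).getD m 0 = ((words.map (fun w => pvStringToMask w.toList)).count m : Int) := by
    intro m
    rw [← List.foldl_map (f := fun w : String => pvStringToMask w.toList)
      (g := fun (d : PySem.Dict Nat Int) x => d.modify x 0 (· + 1)),
      PySem.Dict.getD_foldl_modify_add_one, PySem.Dict.getD_empty]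
    ring
  have hrw : ∀ m ∈ Finset.Icc 1 (pvStringToMask p),
      (if m &&& pvStringToMask p = m ∧ m &&& (1 <<< pvCharToBit (p.headD 'a')) ≠ 0 then
        (words.foldl (fun d w => d.modify (pvStringToMask w.toList) 0 (· + 1))
          PySem.Dict.empty).getD m 0 else 0) =
      (if m &&& pvStringToMask p = m ∧ m &&& (1 <<< pvCharToBit (p.headD 'a')) ≠ 0 then
        (((words.map (fun w => pvStringToMask w.toList)).count m : Int)) else 0) := by
    intro m _
    rw [hd]
  rw [Finset.sum_congr rfl hrw]
  rw [pvSumCount _ _ _ (by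
    intro x h1 h2
    rw [Finset.mem_Icc]
    constructor
    · by_contra h
      have : x = 0 := by omega
      subst this
      exact h2 (Nat.zero_and _)
    · calc x = x &&& pvStringToMask p := h1.symm
        _ ≤ pvStringToMask p := Nat.and_le_right)]
  rw [List.map_map, List.map_map]
  apply congrArg List.sum
  apply List.map_congr_left
  intro w hwmem
  simp only [Function.comp]
  have hsub := pvMaskSubset w.toList p (hw w hwmem) hpc
  have hfst := pvMaskFirst w.toList (p.headD 'a') (hw w hwmem) hc097
  have hiff : (pvStringToMask w.toList &&& pvStringToMask p = pvStringToMask w.toList ∧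
      pvStringToMask w.toList &&& (1 <<< pvCharToBit (p.headD 'a')) ≠ 0) ↔
      (PySem.Set.contains (PySem.Set.ofList w.toList) (p.headD 'a') &&
        PySem.Set.issubset (PySem.Set.ofList w.toList) (PySem.Set.ofList p)) = true := by
    rw [Bool.and_eq_true, PySem.Set.contains_iff, PySem.Set.issubset_iff, hsub, hfst]
    constructor
    · rintro ⟨h1, h2⟩
      refine ⟨(PySem.Set.mem_ofList _ _).mpr h2, ?_⟩
      intro c hc
      exact (PySem.Set.mem_ofList _ _).mpr (h1 c ((PySem.Set.mem_ofList _ _).mp hc))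
    · rintro ⟨h1, h2⟩
      refine ⟨?_, (PySem.Set.mem_ofList _ _).mp h1⟩
      intro c hc
      exact (PySem.Set.mem_ofList _ _).mp (h2 c ((PySem.Set.mem_ofList _ _).mpr hc))
  by_cases hc : pvStringToMask w.toList &&& pvStringToMask p = pvStringToMask w.toList ∧
      pvStringToMask w.toList &&& (1 <<< pvCharToBit (p.headD 'a')) ≠ 0
  · rw [if_pos hc, if_pos (hiff.mp hc)]
  · rw [if_neg hc, if_neg (fun h => hc (hiff.mpr h))]

-- ===== VERDICT (by name: the statement is the Claim_ definition above) =====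
theorem find_num_words_bitmask_spec : Claim_equal_find_num_words_bitmask := by
  intro words puzzles _hdom hpre
  obtain ⟨hw', hp'⟩ := hpre
  have hw : ∀ w ∈ words, ∀ c ∈ w.toList, 97 ≤ c.toNat := by
    simpa using hw'
  have hp : ∀ p ∈ puzzles, p.toList ≠ [] ∧ ∀ c ∈ p.toList, 97 ≤ c.toNat := by
    have h := hp'
    simp only [List.all_eq_true, Bool.and_eq_true, Bool.not_eq_true', List.isEmpty_eq_false_iff,
      decide_eq_true_eq] at h
    intro p hpm
    exact ⟨(h p hpm).1, (h p hpm).2⟩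
  show find_num_words_bitmask words puzzles = find_num_words_bitmask_alt words puzzles
  unfold find_num_words_bitmask find_num_words_bitmask_alt
  simp only [PySem.List.foldl_append_singleton_eq_map, List.nil_append]
  apply List.map_congr_left
  intro p hpmem
  obtain ⟨hne, hpc⟩ := hp p hpmem
  exact pvPerPuzzle words p.toList hw hne hpc
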